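-- pv_equiv track=rewrite | github.com/Whitecki/ASD | Dynamiki/MIT/PS1.Diffing Data.py | strings
-- ===== SOURCE A (Python) =====
-- from math import inf
--
-- def strings(A,B):
--     a,b = len(A),len(B)
--     # Na początku musimy znaleźć optymalną podstrukturę. Spróbuję na początek wziąć suffixy obu wyrazów.
--     # subproblems: najmniejsza ilość zmian w wyrazach A[:i] i B[:j]
--     dp = [[inf for _ in range(a+1)] for _ in range(b+1)]
--
--     #Base case: 1) pusty wyraz A i pusty wyraz, nie wymagają zmian, natomiast jesli tylko jeden z wyrazów jest pusty, to
--     # ilość zmian jest równa długości tego niepustego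
--     dp[0][0] = 0
--     for i in range(a+1):
--         dp[0][i] = i
--     for i in range(b+1):
--         dp[i][0] = i
--
--     # topological order: z rekurencyjnego zapisu funkcji, wynika że aby rozwiązać podproblem dp[j][i], potrzebuje
--     # podproblemów o mniejszych/równych wartościach j,i
--     for j in range(1,b+1):
--         for i in range(1,a+1):
--
--             if A[i-1] == B[j-1]: # jeżeli literka jest taka sama, to biorę wartość bez tych dwóch literek
--                 dp[j][i] = dp[j-1][i-1]
--             elif A[i-2] == B[j-1] and A[i-1] == B[j-2] and i > 1 and j > 1: # swap
--                 dp[j][i] = dp[j-2][i-2]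
--             else:
--                 dp[j][i] = min(dp[j-1][i],dp[j][i-1]) + 1 # usuwam lub dodaje
--
--     return dp[b][a]
--
-- A = "Alai"
--
-- B = "Alib"
-- ===== SOURCE B (Python) =====
-- def strings(A, B):
--     memo = {}
--     def f(j, i):
--         if j == 0:
--             return i
--         if i == 0:
--             return j
--         key = (j, i)
--         if key in memo:
--             return memo[key]
--         if A[i-1] == B[j-1]:
--             r = f(j-1, i-1)
--         elif i > 1 and j > 1 and A[i-2] == B[j-1] and A[i-1] == B[j-2]:
--             r = f(j-2, i-2)
--         else:
--             r = min(f(j-1, i), f(j, i-1)) + 1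
--         memo[key] = r
--         return r
--     return f(len(B), len(A))
-- ===== Notes on version B (the rewrite author's own statement) =====
-- stated objective: alternative
-- what changed: Replaced the bottom-up (b+1)x(a+1) DP table with a top-down dict-memoized recursion f(j,i) on prefix lengths, keeping the same nonstandard recurrence (zero-cost swap, no substitution case).
import Mathlib
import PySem

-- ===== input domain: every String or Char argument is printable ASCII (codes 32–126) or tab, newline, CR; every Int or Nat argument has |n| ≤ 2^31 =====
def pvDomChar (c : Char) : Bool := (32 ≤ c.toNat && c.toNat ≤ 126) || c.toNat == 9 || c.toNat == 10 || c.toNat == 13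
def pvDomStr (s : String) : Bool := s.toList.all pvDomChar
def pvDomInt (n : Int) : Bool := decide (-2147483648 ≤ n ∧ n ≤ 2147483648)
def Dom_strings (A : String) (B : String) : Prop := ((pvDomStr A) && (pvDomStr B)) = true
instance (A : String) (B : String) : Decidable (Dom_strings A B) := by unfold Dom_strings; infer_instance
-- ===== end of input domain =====

-- B replaces A's bottom-up 2D DP table by a top-down memoized recursion on prefix lengths
-- (same nonstandard recurrence: zero-cost swap, no substitution case); objective: alternative decomposition.


-- ===== PORT A =====
-- dp[j][i] read / write (indices the Python reaches are always in range)
def pvGet2 (dp : List (List Int)) (j i : Nat) : Int := (dp.getD j []).getD i 0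

def pvSet2 (dp : List (List Int)) (j i : Nat) (v : Int) : List (List Int) :=
  dp.set j ((dp.getD j []).set i v)

-- stands for the math.inf fill value; every cell A's result depends on is overwritten before being read
def pvInf : Int := 4611686018427387904

-- body of the inner 'for i in range(1,a+1)' loop; string subscripts ported with PySem.Str.pyGet?,
-- which is exact including the A[-1]/B[-1] negative-index reads the swap test can perform
def pvStepI (A B : String) (j : Nat) (dp : List (List Int)) (i : Nat) : List (List Int) :=
  if PySem.Str.pyGet? A ((i : Int) - 1) = PySem.Str.pyGet? B ((j : Int) - 1) then
    pvSet2 dp j i (pvGet2 dp (j-1) (i-1))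
  else if PySem.Str.pyGet? A ((i : Int) - 2) = PySem.Str.pyGet? B ((j : Int) - 1) ∧
          PySem.Str.pyGet? A ((i : Int) - 1) = PySem.Str.pyGet? B ((j : Int) - 2) ∧
          1 < i ∧ 1 < j then
    pvSet2 dp j i (pvGet2 dp (j-2) (i-2))
  else
    pvSet2 dp j i (min (pvGet2 dp (j-1) i) (pvGet2 dp j (i-1)) + 1)

-- body of the outer 'for j in range(1,b+1)' loop; range(1,n+1) ported as List.range' 1 n,
-- exact here because both bounds are nonnegative
def pvStepJ (A B : String) (a : Nat) (dp : List (List Int)) (j : Nat) : List (List Int) :=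
  (List.range' 1 a).foldl (pvStepI A B j) dp

def strings (A : String) (B : String) : Int :=
  let a := A.toList.length
  let b := B.toList.length
  let dp0 : List (List Int) := List.replicate (b+1) (List.replicate (a+1) pvInf)
  let dp1 := pvSet2 dp0 0 0 0
  let dp2 := (List.range (a+1)).foldl (fun dp i => pvSet2 dp 0 i (i : Int)) dp1
  let dp3 := (List.range (b+1)).foldl (fun dp i => pvSet2 dp i 0 (i : Int)) dp2
  let dp4 := (List.range' 1 b).foldl (pvStepJ A B a) dp3
  pvGet2 dp4 b a

-- ===== PORT B =====
-- f(j, i) of Source B, the recursion on the prefix lengths; the dict memo of Source B only shares calls,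
-- it changes no value, so the port is the bare recursion
def pvF (LA LB : List Char) : Nat → Nat → Int
  | 0, i => (i : Int)
  | (j+1), 0 => ((j : Int) + 1)
  | (j+1), (i+1) =>
      if LA.getD i ' ' = LB.getD j ' ' then pvF LA LB j i
      else if 0 < i ∧ 0 < j ∧ LA.getD (i-1) ' ' = LB.getD j ' ' ∧ LA.getD i ' ' = LB.getD (j-1) ' ' then
        pvF LA LB (j-1) (i-1)
      else min (pvF LA LB j (i+1)) (pvF LA LB (j+1) i) + 1
  termination_by j i => j + i
  decreasing_by all_goals omega

def strings_alt (A : String) (B : String) : Int :=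
  pvF A.toList B.toList B.toList.length A.toList.length

-- ===== PRECONDITION & SPEC =====
def Spec_strings (A : String) (B : String) (out : Int) : Prop := out = strings_alt A B
instance (A : String) (B : String) (out : Int) : Decidable (Spec_strings A B out) := by unfold Spec_strings; infer_instance

-- ===== CLAIM (what is proved, stated in full; the proofs are below) =====
def Claim_equal_strings : Prop := ∀ (A : String) (B : String), Dom_strings A B → Spec_strings A B (strings A B)

-- ===== LEMMAS AND PROOFS =====

-- table shape: b+1 rows of a+1 entries each
def pvShape (dp : List (List Int)) (b a : Nat) : Prop :=
  dp.length = b + 1 ∧ ∀ r ∈ dp, r.length = a + 1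

lemma pvRowLen {dp : List (List Int)} {b a : Nat} (h : pvShape dp b a) {j : Nat}
    (hj : j ≤ b) : (dp.getD j []).length = a + 1 := by
  obtain ⟨hl, hr⟩ := h
  have hjl : j < dp.length := by omega
  have : dp.getD j [] = dp[j] := by
    simp [List.getD_eq_getElem?_getD, List.getElem?_eq_getElem hjl]
  rw [this]
  exact hr _ (List.getElem_mem hjl)

lemma pvShape_set2 {dp : List (List Int)} {b a : Nat} (h : pvShape dp b a) {j i : Nat}
    (hj : j ≤ b) (v : Int) : pvShape (pvSet2 dp j i v) b a := by
  obtain ⟨hl, hr⟩ := h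
  refine ⟨by simp [pvSet2, hl], ?_⟩
  intro r hrm
  rcases List.mem_or_eq_of_mem_set hrm with hm | he
  · exact hr _ hm
  · subst he
    rw [List.length_set]
    exact pvRowLen ⟨hl, hr⟩ hj

lemma pvGet2_set2 {dp : List (List Int)} {b a : Nat} (h : pvShape dp b a) {j i : Nat}
    (hj : j ≤ b) (hi : i ≤ a) (v : Int) (j' i' : Nat) :
    pvGet2 (pvSet2 dp j i v) j' i' = if j' = j ∧ i' = i then v else pvGet2 dp j' i' := by
  have hl : dp.length = b + 1 := h.1
  have hjl : j < dp.length := by omega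
  have hil : i < (dp.getD j []).length := by rw [pvRowLen h hj]; omega
  by_cases hjj : j' = j
  · subst hjj
    have hrow : (pvSet2 dp j' i v).getD j' [] = (dp.getD j' []).set i v := by
      unfold pvSet2
      simp [List.getD_eq_getElem?_getD, List.getElem?_set_self hjl]
    unfold pvGet2
    rw [hrow]
    by_cases hii : i' = i
    · subst hii
      have hil' : i' < (dp[j']?.getD ([] : List Int)).length := by
        simpa [List.getD_eq_getElem?_getD] using hil
      simp [List.getD_eq_getElem?_getD, List.getElem?_set_self hil']
    · rw [if_neg (by tauto)]
      simp [List.getD_eq_getElem?_getD, List.getElem?_set_ne (fun h' => hii h'.symm)]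
  · rw [if_neg (by tauto)]
    unfold pvGet2 pvSet2
    simp [List.getD_eq_getElem?_getD, List.getElem?_set_ne (fun h' => hjj h'.symm)]

-- pvF base values
lemma pvF_zero_left (LA LB : List Char) (i : Nat) : pvF LA LB 0 i = (i : Int) := by
  cases i <;> simp [pvF]

lemma pvF_zero_right (LA LB : List Char) (j : Nat) : pvF LA LB j 0 = (j : Int) := by
  cases j <;> simp [pvF]

-- string indexing bridge: an in-range nonnegative pyGet? is the list element
lemma pvStrGet (s : String) (k : Nat) (hk : k < s.toList.length) :
    PySem.Str.pyGet? s (k : Int) = some (s.toList.getD k ' ') := by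
  have hb : PySem.Str.pyGet? s (k : Int) = PySem.List.pyGet? s.toList (k : Int) := by
    simp [PySem.Str.pyGet?]
  have h0 : (0 : Int) ≤ (k : Int) := by positivity
  have h1 : (k : Int) < (s.toList.length : Int) := by exact_mod_cast hk
  rw [hb, PySem.List.pyGet?_eq_some_getElem _ h0 h1]
  simp [List.getD_eq_getElem?_getD, List.getElem?_eq_getElem hk]

-- the inner-loop invariant: after processing i = 1..n of row j, row j is correct up to n,
-- all other rows are untouched
lemma pvInnerInv (A B : String) (j : Nat) (hj1 : 1 ≤ j) (hjb : j ≤ B.toList.length)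
    (n : Nat) : n ≤ A.toList.length →
    ∀ dp, pvShape dp B.toList.length A.toList.length →
      (∀ j' i', j' < j → i' ≤ A.toList.length →
        pvGet2 dp j' i' = pvF A.toList B.toList j' i') →
      (pvGet2 dp j 0 = pvF A.toList B.toList j 0) →
      pvShape ((List.range' 1 n).foldl (pvStepI A B j) dp) B.toList.length A.toList.length ∧
      (∀ j' i', j' ≠ j →
        pvGet2 ((List.range' 1 n).foldl (pvStepI A B j) dp) j' i' = pvGet2 dp j' i') ∧
      (∀ i', i' ≤ n →
        pvGet2 ((List.range' 1 n).foldl (pvStepI A B j) dp) j i' = pvF A.toList B.toList j i') := by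
  induction n with
  | zero =>
    intro _ dp hS hPrev hCol0
    refine ⟨by simpa [List.range'_zero] using hS, fun _ _ _ => by simp [List.range'_zero], ?_⟩
    intro i' hi'
    have h0 : i' = 0 := by omega
    subst h0
    simpa [List.range'_zero] using hCol0
  | succ n ih =>
    intro hn dp hS hPrev hCol0
    obtain ⟨S, Fr, Cur⟩ := ih (by omega) dp hS hPrev hCol0
    have hIdx : 1 + 1 * n = n + 1 := by omega
    have hconcat : List.range' 1 (n+1) = List.range' 1 n ++ [n+1] := by
      rw [List.range'_concat, hIdx]
    rw [hconcat, List.foldl_append, List.foldl_cons, List.foldl_nil]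
    set dpn := (List.range' 1 n).foldl (pvStepI A B j) dp with hdpn
    have hPrev' : ∀ j' i', j' < j → i' ≤ A.toList.length →
        pvGet2 dpn j' i' = pvF A.toList B.toList j' i' := by
      intro j' i' h1 h2
      rw [Fr j' i' (by omega)]
      exact hPrev j' i' h1 h2
    obtain ⟨jj, rfl⟩ : ∃ jj, j = jj + 1 := ⟨j - 1, by omega⟩
    have hjjb : jj < B.toList.length := by omega
    have hna : n < A.toList.length := by omega
    have e1 : ((n+1 : Nat) : Int) - 1 = ((n : Nat) : Int) := by push_cast; ring
    have e2 : ((jj+1 : Nat) : Int) - 1 = ((jj : Nat) : Int) := by push_cast; ring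
    have hA1 : PySem.Str.pyGet? A (((n+1 : Nat) : Int) - 1) = some (A.toList.getD n ' ') := by
      rw [e1]; exact pvStrGet A n hna
    have hB1 : PySem.Str.pyGet? B (((jj+1 : Nat) : Int) - 1) = some (B.toList.getD jj ' ') := by
      rw [e2]; exact pvStrGet B jj hjjb
    by_cases hc1 : A.toList.getD n ' ' = B.toList.getD jj ' '
    · -- equal last characters: dp[j][i] = dp[j-1][i-1]
      have hstep : pvStepI A B (jj+1) dpn (n+1)
          = pvSet2 dpn (jj+1) (n+1) (pvGet2 dpn jj n) := by
        unfold pvStepI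
        rw [if_pos (by rw [hA1, hB1, hc1])]
        norm_num
      have hval : pvGet2 dpn jj n = pvF A.toList B.toList jj n :=
        hPrev' jj n (by omega) (by omega)
      have hF : pvF A.toList B.toList (jj+1) (n+1) = pvF A.toList B.toList jj n := by
        rw [pvF, if_pos hc1]
      refine ⟨by rw [hstep]; exact pvShape_set2 S hjb _, ?_, ?_⟩
      · intro j' i' hne
        rw [hstep, pvGet2_set2 S hjb hn _ j' i', if_neg (by tauto)]
        exact Fr j' i' hne
      · intro i' hi'
        rw [hstep, pvGet2_set2 S hjb hn _ _ i']
        by_cases hii : i' = n+1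
        · subst hii
          rw [if_pos ⟨rfl, rfl⟩, hval, hF]
        · rw [if_neg (by tauto)]
          exact Cur i' (by omega)
    · have hnc1 : ¬ (PySem.Str.pyGet? A (((n+1 : Nat) : Int) - 1)
          = PySem.Str.pyGet? B (((jj+1 : Nat) : Int) - 1)) := by
        rw [hA1, hB1]; simpa using hc1
      by_cases hc2 : 0 < n ∧ 0 < jj ∧ A.toList.getD (n-1) ' ' = B.toList.getD jj ' ' ∧
          A.toList.getD n ' ' = B.toList.getD (jj-1) ' '
      · -- swap case: dp[j][i] = dp[j-2][i-2]
        obtain ⟨hn0, hj0, hx, hy⟩ := hc2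
        have e3 : ((n+1 : Nat) : Int) - 2 = ((n-1 : Nat) : Int) := by omega
        have e4 : ((jj+1 : Nat) : Int) - 2 = ((jj-1 : Nat) : Int) := by omega
        have hA2 : PySem.Str.pyGet? A (((n+1 : Nat) : Int) - 2) = some (A.toList.getD (n-1) ' ') := by
          rw [e3]; exact pvStrGet A (n-1) (by omega)
        have hB2 : PySem.Str.pyGet? B (((jj+1 : Nat) : Int) - 2) = some (B.toList.getD (jj-1) ' ') := by
          rw [e4]; exact pvStrGet B (jj-1) (by omega)
        have hstep : pvStepI A B (jj+1) dpn (n+1)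
            = pvSet2 dpn (jj+1) (n+1) (pvGet2 dpn (jj-1) (n-1)) := by
          unfold pvStepI
          rw [if_neg hnc1,
            if_pos ⟨by rw [hA2, hB1, hx], by rw [hA1, hB2, hy], by omega, by omega⟩]
          have : jj + 1 - 2 = jj - 1 := by omega
          rw [this]
          have : n + 1 - 2 = n - 1 := by omega
          rw [this]
        have hval : pvGet2 dpn (jj-1) (n-1) = pvF A.toList B.toList (jj-1) (n-1) :=
          hPrev' (jj-1) (n-1) (by omega) (by omega)
        have hF : pvF A.toList B.toList (jj+1) (n+1) = pvF A.toList B.toList (jj-1) (n-1) := by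
          rw [pvF, if_neg hc1, if_pos ⟨hn0, hj0, hx, hy⟩]
        refine ⟨by rw [hstep]; exact pvShape_set2 S hjb _, ?_, ?_⟩
        · intro j' i' hne
          rw [hstep, pvGet2_set2 S hjb hn _ j' i', if_neg (by tauto)]
          exact Fr j' i' hne
        · intro i' hi'
          rw [hstep, pvGet2_set2 S hjb hn _ _ i']
          by_cases hii : i' = n+1
          · subst hii
            rw [if_pos ⟨rfl, rfl⟩, hval, hF]
          · rw [if_neg (by tauto)]
            exact Cur i' (by omega)
      · -- insert/delete case: dp[j][i] = min(dp[j-1][i], dp[j][i-1]) + 1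
        have hnc2 : ¬ (PySem.Str.pyGet? A (((n+1 : Nat) : Int) - 2)
              = PySem.Str.pyGet? B (((jj+1 : Nat) : Int) - 1) ∧
            PySem.Str.pyGet? A (((n+1 : Nat) : Int) - 1)
              = PySem.Str.pyGet? B (((jj+1 : Nat) : Int) - 2) ∧
            1 < n+1 ∧ 1 < jj+1) := by
          rintro ⟨h1, h2, h3, h4⟩
          have hn0 : 0 < n := by omega
          have hj0 : 0 < jj := by omega
          have e3 : ((n+1 : Nat) : Int) - 2 = ((n-1 : Nat) : Int) := by omega
          have e4 : ((jj+1 : Nat) : Int) - 2 = ((jj-1 : Nat) : Int) := by omega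
          rw [e3, pvStrGet A (n-1) (by omega), hB1] at h1
          rw [hA1, e4, pvStrGet B (jj-1) (by omega)] at h2
          exact hc2 ⟨hn0, hj0, Option.some.inj h1, Option.some.inj h2⟩
        have hstep : pvStepI A B (jj+1) dpn (n+1)
            = pvSet2 dpn (jj+1) (n+1)
                (min (pvGet2 dpn jj (n+1)) (pvGet2 dpn (jj+1) n) + 1) := by
          unfold pvStepI
          rw [if_neg hnc1, if_neg hnc2]
          norm_num
        have hv1 : pvGet2 dpn jj (n+1) = pvF A.toList B.toList jj (n+1) :=
          hPrev' jj (n+1) (by omega) (by omega)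
        have hv2 : pvGet2 dpn (jj+1) n = pvF A.toList B.toList (jj+1) n :=
          Cur n le_rfl
        have hF : pvF A.toList B.toList (jj+1) (n+1)
            = min (pvF A.toList B.toList jj (n+1)) (pvF A.toList B.toList (jj+1) n) + 1 := by
          rw [pvF, if_neg hc1, if_neg hc2]
        refine ⟨by rw [hstep]; exact pvShape_set2 S hjb _, ?_, ?_⟩
        · intro j' i' hne
          rw [hstep, pvGet2_set2 S hjb hn _ j' i', if_neg (by tauto)]
          exact Fr j' i' hne
        · intro i' hi'
          rw [hstep, pvGet2_set2 S hjb hn _ _ i']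
          by_cases hii : i' = n+1
          · subst hii
            rw [if_pos ⟨rfl, rfl⟩, hv1, hv2, hF]
          · rw [if_neg (by tauto)]
            exact Cur i' (by omega)

-- the outer-loop invariant: after processing rows 1..m, rows 0..m are correct
-- and the first column of the remaining rows is still in place
lemma pvOuterInv (A B : String) (m : Nat) : m ≤ B.toList.length →
    ∀ dp, pvShape dp B.toList.length A.toList.length →
      (∀ i', i' ≤ A.toList.length → pvGet2 dp 0 i' = (i' : Int)) →
      (∀ j', j' ≤ B.toList.length → pvGet2 dp j' 0 = (j' : Int)) →
      pvShape ((List.range' 1 m).foldl (pvStepJ A B A.toList.length) dp)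
        B.toList.length A.toList.length ∧
      (∀ j' i', j' ≤ m → i' ≤ A.toList.length →
        pvGet2 ((List.range' 1 m).foldl (pvStepJ A B A.toList.length) dp) j' i' =
          pvF A.toList B.toList j' i') ∧
      (∀ j', m < j' → j' ≤ B.toList.length →
        pvGet2 ((List.range' 1 m).foldl (pvStepJ A B A.toList.length) dp) j' 0 = (j' : Int)) := by
  induction m with
  | zero =>
    intro _ dp hS hRow hCol
    refine ⟨by simpa [List.range'_zero] using hS, ?_, ?_⟩
    · intro j' i' hj' hi'
      have h0 : j' = 0 := by omega
      subst h0
      rw [pvF_zero_left]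
      simpa [List.range'_zero] using hRow i' hi'
    · intro j' _ hj'
      simpa [List.range'_zero] using hCol j' hj'
  | succ m ih =>
    intro hm dp hS hRow hCol
    obtain ⟨S, Corr, Col⟩ := ih (by omega) dp hS hRow hCol
    have hIdx : 1 + 1 * m = m + 1 := by omega
    have hconcat : List.range' 1 (m+1) = List.range' 1 m ++ [m+1] := by
      rw [List.range'_concat, hIdx]
    rw [hconcat, List.foldl_append, List.foldl_cons, List.foldl_nil]
    set dpm := (List.range' 1 m).foldl (pvStepJ A B A.toList.length) dp with hdpm
    have hCol0 : pvGet2 dpm (m+1) 0 = pvF A.toList B.toList (m+1) 0 := by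
      rw [pvF_zero_right]
      exact Col (m+1) (by omega) hm
    obtain ⟨S', Fr', Cur'⟩ :=
      pvInnerInv A B (m+1) (by omega) hm A.toList.length le_rfl dpm S
        (fun j' i' h1 h2 => Corr j' i' (by omega) h2) hCol0
    refine ⟨S', ?_, ?_⟩
    · intro j' i' hj' hi'
      by_cases he : j' = m+1
      · subst he
        exact Cur' i' hi'
      · rw [show pvStepJ A B A.toList.length dpm (m+1)
            = (List.range' 1 A.toList.length).foldl (pvStepI A B (m+1)) dpm from rfl,
          Fr' j' i' he]
        exact Corr j' i' (by omega) hi'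
    · intro j' h1 h2
      rw [show pvStepJ A B A.toList.length dpm (m+1)
          = (List.range' 1 A.toList.length).foldl (pvStepI A B (m+1)) dpm from rfl,
        Fr' j' 0 (by omega)]
      exact Col j' (by omega) h2

-- initialisation of row 0 with dp[0][i] = i
lemma pvInitRow (A B : String) (n : Nat) : n ≤ A.toList.length + 1 →
    ∀ dp, pvShape dp B.toList.length A.toList.length →
      pvShape ((List.range n).foldl (fun dp i => pvSet2 dp 0 i (i : Int)) dp)
        B.toList.length A.toList.length ∧
      (∀ j' i', j' ≠ 0 →
        pvGet2 ((List.range n).foldl (fun dp i => pvSet2 dp 0 i (i : Int)) dp) j' i' =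
          pvGet2 dp j' i') ∧
      (∀ i', i' < n →
        pvGet2 ((List.range n).foldl (fun dp i => pvSet2 dp 0 i (i : Int)) dp) 0 i' = (i' : Int)) := by
  induction n with
  | zero =>
    intro _ dp hS
    exact ⟨by simpa [List.range_zero] using hS, fun _ _ _ => by simp [List.range_zero],
      fun i' hi' => absurd hi' (by omega)⟩
  | succ n ih =>
    intro hn dp hS
    obtain ⟨S, Fr, Cur⟩ := ih (by omega) dp hS
    rw [List.range_succ, List.foldl_append, List.foldl_cons, List.foldl_nil]
    set dpn := (List.range n).foldl (fun dp i => pvSet2 dp 0 i (i : Int)) dp with hdpn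
    have hna : n ≤ A.toList.length := by omega
    refine ⟨pvShape_set2 S (Nat.zero_le _) _, ?_, ?_⟩
    · intro j' i' hne
      rw [pvGet2_set2 S (Nat.zero_le _) hna _ j' i', if_neg (by tauto)]
      exact Fr j' i' hne
    · intro i' hi'
      rw [pvGet2_set2 S (Nat.zero_le _) hna _ 0 i']
      by_cases hii : i' = n
      · subst hii
        rw [if_pos ⟨rfl, rfl⟩]
      · rw [if_neg (by tauto)]
        exact Cur i' (by omega)

-- initialisation of column 0 with dp[i][0] = i
lemma pvInitCol (A B : String) (n : Nat) : n ≤ B.toList.length + 1 →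
    ∀ dp, pvShape dp B.toList.length A.toList.length →
      pvShape ((List.range n).foldl (fun dp i => pvSet2 dp i 0 (i : Int)) dp)
        B.toList.length A.toList.length ∧
      (∀ j' i', i' ≠ 0 →
        pvGet2 ((List.range n).foldl (fun dp i => pvSet2 dp i 0 (i : Int)) dp) j' i' =
          pvGet2 dp j' i') ∧
      (∀ j', j' < n →
        pvGet2 ((List.range n).foldl (fun dp i => pvSet2 dp i 0 (i : Int)) dp) j' 0 = (j' : Int)) := by
  induction n with
  | zero =>
    intro _ dp hS
    exact ⟨by simpa [List.range_zero] using hS, fun _ _ _ => by simp [List.range_zero],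
      fun j' hj' => absurd hj' (by omega)⟩
  | succ n ih =>
    intro hn dp hS
    obtain ⟨S, Fr, Cur⟩ := ih (by omega) dp hS
    rw [List.range_succ, List.foldl_append, List.foldl_cons, List.foldl_nil]
    set dpn := (List.range n).foldl (fun dp i => pvSet2 dp i 0 (i : Int)) dp with hdpn
    have hnb : n ≤ B.toList.length := by omega
    refine ⟨pvShape_set2 S hnb _, ?_, ?_⟩
    · intro j' i' hne
      rw [pvGet2_set2 S hnb (Nat.zero_le _) _ j' i', if_neg (by tauto)]
      exact Fr j' i' hne
    · intro j' hj'
      rw [pvGet2_set2 S hnb (Nat.zero_le _) _ j' 0]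
      by_cases hjj : j' = n
      · subst hjj
        rw [if_pos ⟨rfl, rfl⟩]
      · rw [if_neg (by tauto)]
        exact Cur j' (by omega)

-- the fully initialised table dp3: correct base row and base column
lemma pvInitInv (A B : String) :
    ∀ P3 : List (List Int),
    P3 = (List.range (B.toList.length + 1)).foldl (fun dp i => pvSet2 dp i 0 (i : Int))
          ((List.range (A.toList.length + 1)).foldl (fun dp i => pvSet2 dp 0 i (i : Int))
            (pvSet2 (List.replicate (B.toList.length + 1)
              (List.replicate (A.toList.length + 1) pvInf)) 0 0 0)) →
      pvShape P3 B.toList.length A.toList.length ∧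
      (∀ i', i' ≤ A.toList.length → pvGet2 P3 0 i' = (i' : Int)) ∧
      (∀ j', j' ≤ B.toList.length → pvGet2 P3 j' 0 = (j' : Int)) := by
  intro P3 hP3
  have hS0 : pvShape (List.replicate (B.toList.length + 1)
      (List.replicate (A.toList.length + 1) pvInf)) B.toList.length A.toList.length := by
    refine ⟨by simp, ?_⟩
    intro r hr
    rw [List.eq_of_mem_replicate hr]
    simp
  have hS1 : pvShape (pvSet2 (List.replicate (B.toList.length + 1)
      (List.replicate (A.toList.length + 1) pvInf)) 0 0 0) B.toList.length A.toList.length :=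
    pvShape_set2 hS0 (Nat.zero_le _) 0
  obtain ⟨hS2, _, hRow2⟩ := pvInitRow A B (A.toList.length + 1) le_rfl _ hS1
  obtain ⟨hS3, hFr3, hCol3⟩ := pvInitCol A B (B.toList.length + 1) le_rfl _ hS2
  subst hP3
  refine ⟨hS3, ?_, ?_⟩
  · intro i' hi'
    by_cases h0 : i' = 0
    · subst h0
      simpa using hCol3 0 (by omega)
    · rw [hFr3 _ _ h0]
      exact hRow2 i' (by omega)
  · intro j' hj'
    exact hCol3 j' (by omega)

-- ===== VERDICT (by name: the statement is the Claim_ definition above) =====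
theorem strings_spec : Claim_equal_strings := by
  intro A B _
  unfold Spec_strings strings strings_alt
  dsimp only
  obtain ⟨hS, hRow, hCol⟩ := pvInitInv A B _ rfl
  exact (pvOuterInv A B B.toList.length le_rfl _ hS hRow hCol).2.1 B.toList.length
    A.toList.length le_rfl le_rfl
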